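-- pv_equiv track=rewrite | github.com/Joys-Dawn/Plethysmography | plethysmography/analysis/breath_segmentation.py | _collapse_same_sign
-- ===== SOURCE A (Python) =====
-- from typing import List, Optional, Tuple
--
-- _Segment = Tuple[int, int, int]
--
-- def _collapse_same_sign(segments: List[_Segment]) -> List[_Segment]:
--     """Defensively collapse adjacent same-sign segments into one."""
--     cleaned: List[_Segment] = []
--     for seg in segments:
--         if cleaned and cleaned[-1][0] == seg[0]:
--             cleaned[-1] = (seg[0], cleaned[-1][1], seg[2])
--         else:
--             cleaned.append(seg)
--     return cleaned
-- ===== SOURCE B (Python) =====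
-- from typing import List, Tuple
--
-- _Segment = Tuple[int, int, int]
--
-- def _collapse_same_sign(segments: List[_Segment]) -> List[_Segment]:
--     """Two-pointer scan: find each maximal same-sign run, emit one tuple per run."""
--     collapsed: List[_Segment] = []
--     i, n = 0, len(segments)
--     while i < n:
--         sign, start = segments[i][0], segments[i][1]
--         j = i + 1
--         while j < n and segments[j][0] == sign:
--             j += 1
--         collapsed.append((sign, start, segments[j - 1][2]))
--         i = j
--     return collapsed
-- ===== Notes on version B (the rewrite author's own statement) =====
-- stated objective: alternative
-- what changed: Replaces A's incremental fold that merges each segment into the last collected tuple with a two-pointer scan that finds each maximal same-sign run and emits one tuple (sign, run start, run end) per run.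
import Mathlib
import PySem

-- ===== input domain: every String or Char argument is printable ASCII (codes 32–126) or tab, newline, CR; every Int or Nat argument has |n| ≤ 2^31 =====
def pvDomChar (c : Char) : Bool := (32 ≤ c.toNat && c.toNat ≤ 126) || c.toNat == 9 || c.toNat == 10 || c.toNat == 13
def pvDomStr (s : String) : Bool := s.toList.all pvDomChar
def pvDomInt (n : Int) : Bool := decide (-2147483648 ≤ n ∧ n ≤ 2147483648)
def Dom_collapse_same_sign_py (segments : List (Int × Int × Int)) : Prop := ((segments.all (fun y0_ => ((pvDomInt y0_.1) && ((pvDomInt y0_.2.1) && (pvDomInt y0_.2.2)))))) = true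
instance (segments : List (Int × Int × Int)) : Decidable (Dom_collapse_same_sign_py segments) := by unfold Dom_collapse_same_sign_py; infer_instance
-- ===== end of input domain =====

-- B replaces A's incremental merge-into-last fold by a two-pointer scan that finds each
-- maximal same-sign run and emits one tuple per run (alternative decomposition, same O(n)).

-- ===== PORT A =====
-- one step of A's loop body: merge into the last collected segment or append
def pvStepA (cleaned : List (Int × Int × Int)) (seg : Int × Int × Int) : List (Int × Int × Int) :=
  match cleaned.getLast? with
  | some last =>
      if last.1 = seg.1 then cleaned.dropLast ++ [(seg.1, last.2.1, seg.2.2)]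
      else cleaned ++ [seg]
  | none => cleaned ++ [seg]

def collapse_same_sign_py (segments : List (Int × Int × Int)) : List (Int × Int × Int) :=
  segments.foldl pvStepA []

-- ===== PORT B =====
-- inner while loop of B: advance j while segments[j] has the given sign
def pvRunEnd (segs : List (Int × Int × Int)) (sign : Int) (j : Nat) : Nat :=
  if h : j < segs.length then
    if (segs[j]).1 = sign then pvRunEnd segs sign (j + 1) else j
  else j
termination_by segs.length - j

theorem pvRunEnd_ge (segs : List (Int × Int × Int)) (sign : Int) (j : Nat) :
    j ≤ pvRunEnd segs sign j := by
  fun_induction pvRunEnd <;> omega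

-- outer while loop of B: one emitted tuple per maximal run starting at i
def pvCollect (segs : List (Int × Int × Int)) (i : Nat) : List (Int × Int × Int) :=
  if h : i < segs.length then
    let s := segs[i]
    let j := pvRunEnd segs s.1 (i + 1)
    (s.1, s.2.1, (segs.getD (j - 1) (0, 0, 0)).2.2) :: pvCollect segs j
  else []
termination_by segs.length - i
decreasing_by
  have := pvRunEnd_ge segs (segs[i]).1 (i + 1)
  omega

def collapse_same_sign_py_alt (segments : List (Int × Int × Int)) : List (Int × Int × Int) :=
  pvCollect segments 0

-- ===== PRECONDITION & SPEC =====
def Spec_collapse_same_sign_py (segments : List (Int × Int × Int)) (out : List (Int × Int × Int)) : Prop := out = collapse_same_sign_py_alt segments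
instance (segments : List (Int × Int × Int)) (out : List (Int × Int × Int)) : Decidable (Spec_collapse_same_sign_py segments out) := by unfold Spec_collapse_same_sign_py; infer_instance

-- ===== CLAIM (what is proved, stated in full; the proofs are below) =====
def Claim_equal_collapse_same_sign_py : Prop := ∀ (segments : List (Int × Int × Int)), Dom_collapse_same_sign_py segments → Spec_collapse_same_sign_py segments (collapse_same_sign_py segments)

-- ===== LEMMAS AND PROOFS =====

-- common middle form: merge-accumulate with a pending segment l
def pvAux (l : Int × Int × Int) : List (Int × Int × Int) → List (Int × Int × Int)
  | [] => [l]
  | s :: rest => if l.1 = s.1 then pvAux (s.1, l.2.1, s.2.2) rest else l :: pvAux s rest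

def pvAuxList : List (Int × Int × Int) → List (Int × Int × Int)
  | [] => []
  | s :: rest => pvAux s rest

theorem foldl_stepA (segs : List (Int × Int × Int)) :
    ∀ (init : List (Int × Int × Int)) (l : Int × Int × Int),
      segs.foldl pvStepA (init ++ [l]) = init ++ pvAux l segs := by
  induction segs with
  | nil => intro init l; simp [pvAux]
  | cons s rest ih =>
    intro init l
    simp only [List.foldl_cons, pvStepA, List.getLast?_concat, List.dropLast_concat, pvAux]
    by_cases h : l.1 = s.1
    · rw [if_pos h, if_pos h]; exact ih init _
    · rw [if_neg h, if_neg h]; simpa using ih (init ++ [l]) s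

theorem collapseA_eq_auxList (segs : List (Int × Int × Int)) :
    collapse_same_sign_py segs = pvAuxList segs := by
  cases segs with
  | nil => rfl
  | cons s rest =>
    show (s :: rest).foldl pvStepA [] = pvAux s rest
    have : pvStepA [] s = [] ++ [s] := rfl
    rw [List.foldl_cons, this, foldl_stepA]
    simp

theorem pvRunEnd_le (segs : List (Int × Int × Int)) (sign : Int) (j : Nat)
    (hj : j ≤ segs.length) : pvRunEnd segs sign j ≤ segs.length := by
  fun_induction pvRunEnd <;> omega

theorem pvRunEnd_keys (segs : List (Int × Int × Int)) (sign : Int) (j : Nat) :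
    ∀ k, j ≤ k → k < pvRunEnd segs sign j → (segs.getD k (0, 0, 0)).1 = sign := by
  fun_induction pvRunEnd with
  | case1 j h hs ih =>
    intro k hk1 hk2
    rcases Nat.eq_or_lt_of_le hk1 with rfl | hlt
    · simpa [List.getD, List.getElem?_eq_getElem h] using hs
    · exact ih k hlt hk2
  | case2 j h hs => intro k hk1 hk2; omega
  | case3 j h => intro k hk1 hk2; omega

theorem pvRunEnd_stop (segs : List (Int × Int × Int)) (sign : Int) (j : Nat) :
    pvRunEnd segs sign j < segs.length →
    (segs.getD (pvRunEnd segs sign j) (0, 0, 0)).1 ≠ sign := by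
  fun_induction pvRunEnd with
  | case1 j h hs ih => exact ih
  | case2 j h hs => intro hlt; simpa [List.getD, List.getElem?_eq_getElem h] using hs
  | case3 j h => intro hlt; omega

theorem pvAux_run (run rest' : List (Int × Int × Int)) :
    ∀ (l : Int × Int × Int), (∀ x ∈ run, x.1 = l.1) →
    (∀ r ∈ rest'.head?, r.1 ≠ l.1) →
    pvAux l (run ++ rest') =
      (l.1, l.2.1, ((run.getLast?).getD l).2.2) :: pvAuxList rest' := by
  induction run with
  | nil =>
    intro l _ hrest
    cases rest' with
    | nil => simp [pvAux, pvAuxList]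
    | cons r rr =>
      have hne : ¬ l.1 = r.1 := fun h => hrest r rfl (h.symm)
      simp [pvAux, pvAuxList, hne]
  | cons x run' ih =>
    intro l hrun hrest
    have hx : x.1 = l.1 := hrun x (by simp)
    have : l.1 = x.1 := hx.symm
    simp only [List.cons_append, pvAux, if_pos this]
    rw [ih (x.1, l.2.1, x.2.2)
      (fun y hy => (hrun y (List.mem_cons_of_mem _ hy)).trans hx.symm)
      (fun r hr h => hrest r hr (h.trans hx))]
    cases run' with
    | nil => simp [hx]
    | cons a b =>
      obtain ⟨z, hz⟩ := Option.isSome_iff_exists.mp (List.getLast?_isSome.mpr (List.cons_ne_nil a b))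
      simp [hx, hz]

theorem collect_eq (segs : List (Int × Int × Int)) :
    ∀ i, pvCollect segs i = pvAuxList (segs.drop i) := by
  intro i
  fun_induction pvCollect with
  | case2 i h =>
    rw [List.drop_eq_nil_of_le (by omega)]
    rfl
  | case1 i h s j ih =>
    have hj1 : i + 1 ≤ j := pvRunEnd_ge segs s.1 (i + 1)
    have hjle : j ≤ segs.length := pvRunEnd_le segs s.1 (i + 1) (by omega)
    have hdrop : segs.drop i = s :: segs.drop (i + 1) := List.drop_eq_getElem_cons h
    set run : List (Int × Int × Int) := (segs.drop (i + 1)).take (j - (i + 1)) with hrundef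
    have hsplit : segs.drop (i + 1) = run ++ segs.drop j := by
      rw [hrundef]
      conv_lhs => rw [← List.take_append_drop (j - (i + 1)) (segs.drop (i + 1))]
      congr 1
      rw [List.drop_drop]
      congr 1
      omega
    have hrunlen : run.length = j - (i + 1) := by
      rw [hrundef]; simp; omega
    have hrunget : ∀ k, k < run.length → run[k]? = some (segs.getD (i + 1 + k) (0, 0, 0)) := by
      intro k hk
      have hk2 : i + 1 + k < segs.length := by omega
      rw [hrundef, List.getElem?_take_of_lt (by omega), List.getElem?_drop]
      simp [List.getD, List.getElem?_eq_getElem hk2]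
    have hrun : ∀ x ∈ run, x.1 = s.1 := by
      intro x hx
      obtain ⟨k, hk, rfl⟩ := List.mem_iff_getElem.mp hx
      have hg := hrunget k hk
      rw [List.getElem?_eq_getElem hk] at hg
      rw [Option.some.inj hg]
      exact pvRunEnd_keys segs s.1 (i + 1) (i + 1 + k) (by omega) (by omega)
    have hstop : ∀ r ∈ (segs.drop j).head?, r.1 ≠ s.1 := by
      intro r hr
      have hgr : segs[j]? = some r := by rw [← List.head?_drop]; exact hr
      have hjlt : j < segs.length := by
        by_contra hc
        rw [List.getElem?_eq_none (by omega)] at hgr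
        simp at hgr
      have hst := pvRunEnd_stop segs s.1 (i + 1) hjlt
      simp only [show pvRunEnd segs s.1 (i + 1) = j from rfl, List.getD, hgr,
        Option.getD_some] at hst
      exact hst
    have hlast : (segs.getD (j - 1) (0, 0, 0)).2.2 = (run.getLast?.getD s).2.2 := by
      rcases Nat.eq_or_lt_of_le hj1 with hji | hji
      · have hnil : run = [] := List.eq_nil_of_length_eq_zero (by omega)
        have : j - 1 = i := by omega
        simp [hnil, this, List.getD, List.getElem?_eq_getElem h]
        rfl
      · have hne : run.length - 1 < run.length := by omega
        rw [List.getLast?_eq_getElem?, hrunget _ hne, Option.getD_some]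
        congr 3
        omega
    rw [hdrop]
    show _ = pvAux s (segs.drop (i + 1))
    rw [hsplit, pvAux_run run (segs.drop j) s hrun hstop, ih, hlast]
-- ===== VERDICT (by name: the statement is the Claim_ definition above) =====
theorem collapse_same_sign_py_spec : Claim_equal_collapse_same_sign_py := by
  intro segs _
  show collapse_same_sign_py segs = collapse_same_sign_py_alt segs
  rw [collapseA_eq_auxList]
  rw [show collapse_same_sign_py_alt segs = pvCollect segs 0 from rfl, collect_eq]
  simp
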